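-- pv_equiv track=rewrite | github.com/jgdelrio/HackerRankChallenges | Algorithms/weighted_uniform_strings.py | calculate_set
-- ===== SOURCE A (Python) =====
-- def letter2weight(letter):
--     return ord(letter) - 96
--
-- def calculate_set(s):
--     letter = s[0]
--     count = 1
--     weights = [letter2weight(letter)]
--     for k in s[1:]:
--         if k == letter:
--             count += 1
--             weights.append(count * letter2weight(letter))
--         else:
--             letter = k
--             count = 1
--             weights.append(letter2weight(letter))
--
--     return set(weights)
-- ===== SOURCE B (Python) =====
-- def calculate_set(s):
--     # run-length decomposition: for each maximal run of a letter of weight w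
--     # and length L, the uniform substrings contribute exactly {1*w, ..., L*w}
--     result = set()
--     rest = list(s)
--     while rest:
--         c = rest[0]
--         run = 1
--         while run < len(rest) and rest[run] == c:
--             run += 1
--         w = ord(c) - 96
--         for m in range(1, run + 1):
--             result.add(m * w)
--         rest = rest[run:]
--     return result
-- ===== Notes on version B (the rewrite author's own statement) =====
-- stated objective: alternative
-- what changed: A makes one flat pass keeping a running count and appending every prefix weight to a list that is deduplicated at the end; B decomposes s into maximal runs and, per run of weight w and length L, adds the multiples 1*w..L*w directly into the result set.
-- outside the precondition, e.g. on calculate_set(''): A raises IndexError, B returns set()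
-- crash fix: On the empty string A raises IndexError (it reads s[0]); B returns the empty set. — e.g. on calculate_set(""): A raises IndexError, B returns []
import Mathlib
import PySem

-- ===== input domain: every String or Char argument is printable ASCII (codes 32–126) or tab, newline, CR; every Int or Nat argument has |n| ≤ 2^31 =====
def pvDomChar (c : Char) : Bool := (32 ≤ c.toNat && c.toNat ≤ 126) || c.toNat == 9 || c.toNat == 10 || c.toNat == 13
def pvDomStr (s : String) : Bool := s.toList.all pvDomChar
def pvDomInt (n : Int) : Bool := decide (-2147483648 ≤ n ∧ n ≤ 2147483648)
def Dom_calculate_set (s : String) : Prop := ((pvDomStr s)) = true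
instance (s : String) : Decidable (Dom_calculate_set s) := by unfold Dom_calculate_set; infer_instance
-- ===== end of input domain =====

-- B replaces A's flat running-count pass (list of all prefix weights, deduplicated at the end)
-- by a run-length decomposition adding each run's multiples 1*w..L*w straight into the set;
-- same cost, different decomposition. A raises IndexError on "", excluded by Pre_.


-- ===== PORT A =====
def letter2weight (letter : Char) : Int := (letter.toNat : Int) - 96

def calculate_set (s : String) : List Int :=
  match PySem.List.pyGet? s.toList 0 with
  | none => []    -- s[0] raises IndexError; excluded by Pre_
  | some letter =>
    let st := (PySem.List.slice s.toList (some 1) none).foldl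
      (fun (st : Char × Int × List Int) k =>
        if k == st.1 then
          (st.1, st.2.1 + 1, st.2.2 ++ [(st.2.1 + 1) * letter2weight st.1])
        else
          (k, 1, st.2.2 ++ [letter2weight k]))
      (letter, 1, [letter2weight letter])
    PySem.Set.ofList st.2.2

-- ===== PORT B =====
-- inner while loop of Source B: length of the run of c at the head of l (not counting c itself)
def runCount (c : Char) : List Char → Nat
  | [] => 0
  | k :: l => if k == c then runCount c l + 1 else 0

def calc_core : List Char → List Int → List Int
  | [], res => res
  | c :: l, res =>
      let run : Nat := runCount c l + 1
      let w : Int := (c.toNat : Int) - 96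
      let res := (PySem.List.pyRange 1 ((run : Int) + 1) 1).foldl
        (fun a m => PySem.Set.add a (m * w)) res
      calc_core (l.drop (run - 1)) res
  termination_by l => l.length
  decreasing_by
    simp only [List.length_drop, List.length_cons]; omega

def calculate_set_alt (s : String) : List Int :=
  calc_core s.toList PySem.Set.empty

-- ===== PRECONDITION & SPEC =====
def Pre_calculate_set (s : String) : Prop := s.toList ≠ []
instance (s : String) : Decidable (Pre_calculate_set s) := by unfold Pre_calculate_set; infer_instance
def pvWitness_calculate_set : String := "abbcccde"

-- On the empty string A raises IndexError (it reads s[0]); B returns the empty set.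
def Raises_calculate_set (s : String) : Prop := s.toList = []
instance (s : String) : Decidable (Raises_calculate_set s) := by unfold Raises_calculate_set; infer_instance
def pvRaiseWitness_calculate_set : String := ""
def pvRaiseWitnessOut_calculate_set : List Int := []

def Spec_calculate_set (s : String) (out : List Int) : Prop := out = calculate_set_alt s
instance (s : String) (out : List Int) : Decidable (Spec_calculate_set s out) := by unfold Spec_calculate_set; infer_instance

-- ===== CLAIM (what is proved, stated in full; the proofs are below) =====
def Claim_equal_calculate_set : Prop := ∀ (s : String), Dom_calculate_set s → Pre_calculate_set s → Spec_calculate_set s (calculate_set s)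
def Claim_raises_calculate_set : Prop := (∀ (s : String), Dom_calculate_set s → Raises_calculate_set s → ¬ Pre_calculate_set s) ∧ (Dom_calculate_set (pvRaiseWitness_calculate_set) ∧ Raises_calculate_set (pvRaiseWitness_calculate_set) ∧ calculate_set_alt (pvRaiseWitness_calculate_set) = pvRaiseWitnessOut_calculate_set)

-- ===== LEMMAS AND PROOFS =====

-- the multiples (count+1)*w, (count+2)*w, …, (count+n)*w of the weight of c
def mults (c : Char) (count : Int) : Nat → List Int
  | 0 => []
  | n + 1 => (count + 1) * letter2weight c :: mults c (count + 1) n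

-- the tail of A's weights list from loop state (letter, count)
def tailWeights (letter : Char) (count : Int) : List Char → List Int
  | [] => []
  | k :: l => if k == letter
      then (count + 1) * letter2weight letter :: tailWeights letter (count + 1) l
      else letter2weight k :: tailWeights k 1 l

-- A's full weights list
def headWeights : List Char → List Int
  | [] => []
  | k :: l => letter2weight k :: tailWeights k 1 l

theorem mults_cons (c : Char) (n : Nat) :
    mults c 0 (n + 1) = letter2weight c :: mults c 1 n := by
  simp [mults]

theorem tailWeights_eq (l : List Char) : ∀ (letter : Char) (count : Int),
    tailWeights letter count l
      = mults letter count (runCount letter l) ++ headWeights (l.drop (runCount letter l)) := by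
  induction l with
  | nil => intro letter count; simp [tailWeights, runCount, mults, headWeights]
  | cons k l ih =>
    intro letter count
    by_cases h : k == letter
    · have hk : k = letter := by exact eq_of_beq h
      subst hk
      simp only [tailWeights, runCount, if_pos h, mults, List.drop_succ_cons]
      rw [ih, List.cons_append]
    · simp [tailWeights, runCount, h, mults, headWeights]

theorem A_loop (l : List Char) : ∀ (letter : Char) (count : Int) (weights : List Int),
    (l.foldl (fun (st : Char × Int × List Int) k =>
        if k == st.1 then
          (st.1, st.2.1 + 1, st.2.2 ++ [(st.2.1 + 1) * letter2weight st.1])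
        else
          (k, 1, st.2.2 ++ [letter2weight k]))
      (letter, count, weights)).2.2
    = weights ++ tailWeights letter count l := by
  induction l with
  | nil => intro letter count weights; simp [tailWeights]
  | cons k l ih =>
    intro letter count weights
    by_cases h : k == letter
    · simp only [List.foldl_cons, if_pos h, tailWeights, ih, List.append_assoc,
        List.singleton_append]
    · simp only [List.foldl_cons, if_neg h, tailWeights, ih, List.append_assoc,
        List.singleton_append]

theorem range_map_mults (c : Char) (n : Nat) : ∀ (count : Int),
    (PySem.List.pyRange (count + 1) (count + 1 + (n : Int)) 1).map
        (fun m => m * letter2weight c)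
      = mults c count n := by
  induction n with
  | zero =>
    intro count
    simp only [Nat.cast_zero, add_zero]
    simp [pysem, mults]
  | succ n ih =>
    intro count
    rw [PySem.List.pyRange_one_cons (by push_cast; omega)]
    simp only [List.map_cons, mults]
    have : count + 1 + ((n + 1 : Nat) : Int) = (count + 1) + 1 + (n : Int) := by push_cast; omega
    rw [this, ih (count + 1)]

theorem headWeights_cons (c : Char) (l : List Char) :
    headWeights (c :: l)
      = mults c 0 (runCount c l + 1) ++ headWeights (l.drop (runCount c l)) := by
  simp only [headWeights]
  rw [tailWeights_eq, mults_cons, List.cons_append]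
  rfl

theorem core_eq (n : Nat) : ∀ (l : List Char), l.length ≤ n → ∀ (res : List Int),
    calc_core l res = List.foldl PySem.Set.add res (headWeights l) := by
  induction n with
  | zero =>
    intro l hl res
    have : l = [] := List.eq_nil_of_length_eq_zero (by omega)
    subst this; simp [calc_core, headWeights]
  | succ n ih =>
    intro l hl res
    match l with
    | [] => simp [calc_core, headWeights]
    | c :: l =>
      simp only [calc_core]
      have hfold : (PySem.List.pyRange 1 ((runCount c l + 1 : Nat) + 1) 1).foldl
          (fun a m => PySem.Set.add a (m * ((c.toNat : Int) - 96))) res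
          = List.foldl PySem.Set.add res (mults c 0 (runCount c l + 1)) := by
        rw [← range_map_mults c (runCount c l + 1) 0, ← List.foldl_map]
        have : (0 : Int) + 1 + ((runCount c l + 1 : Nat) : Int)
            = ((runCount c l + 1 : Nat) : Int) + 1 := by push_cast; omega
        rw [this]
        rfl
      rw [hfold]
      have hrun : runCount c l ≤ l.length := by
        clear hfold hl ih
        induction l with
        | nil => simp [runCount]
        | cons k l ih2 =>
          by_cases h : k == c
          · simp only [runCount, if_pos h, List.length_cons]; omega
          · simp [runCount, h]
      have hlen : (l.drop (runCount c l + 1 - 1)).length ≤ n := by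
        simp only [List.length_drop]
        simp only [List.length_cons] at hl
        omega
      rw [ih _ hlen]
      simp only [Nat.add_sub_cancel]
      rw [headWeights_cons, List.foldl_append]

theorem ofList_eq_foldl_add (xs : List Int) :
    PySem.Set.ofList xs = List.foldl PySem.Set.add PySem.Set.empty xs :=
  PySem.Set.ofList_eq_foldl xs

-- ===== VERDICT (by name: the statement is the Claim_ definition above) =====
theorem calculate_set_spec : Claim_equal_calculate_set := by
  intro s _ hpre
  unfold Spec_calculate_set calculate_set calculate_set_alt
  cases hs : s.toList with
  | nil => exact absurd hs hpre
  | cons c l =>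
    rw [core_eq (c :: l).length _ (le_refl _)]
    simp only [PySem.List.pyGet?_zero_cons, PySem.List.slice_from_one, List.tail_cons]
    rw [A_loop, ofList_eq_foldl_add]
    rfl

theorem calculate_set_raises : Claim_raises_calculate_set := by
  unfold Claim_raises_calculate_set
  constructor
  · intro s _ hr hp; exact hp hr
  · refine ⟨by decide, by decide, ?_⟩
    simp [calculate_set_alt, pvRaiseWitness_calculate_set, pvRaiseWitnessOut_calculate_set, calc_core]

-- self-check: the raise witness really lies outside Pre_ (via the first half of the raises claim)
theorem calculate_set_raises_ok : ¬ Pre_calculate_set pvRaiseWitness_calculate_set :=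
  calculate_set_raises.1 pvRaiseWitness_calculate_set (by decide) calculate_set_raises.2.2.1
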